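-- pv_equiv track=rewrite | github.com/Zain0o/python-qr-code-generator | data_encoding.py | encode_byte_mode
-- ===== SOURCE A (Python) =====
-- def encode_byte_mode(data: str) -> tuple[list[str], int]:
--     """Return list of 8-bit codewords and selected version for QR code in Byte Mode.
--     Args:
--         data (str): The input data to encode.
--     Returns:
--         tuple[list[str], int]: A tuple containing the list of 8-bit codewords and the selected version.
--     Raises:
--         ValueError: If the input data contains characters is too long.
--     """
--
--     # Encode input data to ISO-8859-1 bytes, raising ValueError for unsupported characters
--     try:
--         data_bytes = data.encode('iso-8859-1', errors='strict')
--     except UnicodeEncodeError: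
--         raise ValueError("Data contains characters outside ISO-8859-1.")
--
--     # Version capacity check
--     if len(data_bytes) <= 17:
--         version = 1
--         total_data_codewords = 19
--     elif len(data_bytes) <= 32:
--         version = 2
--         total_data_codewords = 34
--     else:
--         raise ValueError(f"Input too long for Version 2 L (max 32 bytes).")
--
--     # Build bit stream
--     bit_stream = '0100'  # Byte mode indicator
--     bit_stream += format(len(data_bytes), '08b')  # Character count (8 bits for V1 & V2)
--
--     # Add data bytes
--     for byte in data_bytes:
--         bit_stream += format(byte, '08b')
--
--     # Calculate total bits needed
--     total_bits_needed = total_data_codewords * 8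
--
--     # Add terminator (up to 4 zeros)
--     remaining_bits = total_bits_needed - len(bit_stream)
--     terminator_bits = min(4, remaining_bits)
--     bit_stream += '0' * terminator_bits
--
--     # Pad to byte boundary
--     if len(bit_stream) % 8 != 0:
--         bit_stream += '0' * (8 - len(bit_stream) % 8)
--
--     # Add pad bytes
--     pad_bytes = ['11101100', '00010001']
--     pad_index = 0
--     while len(bit_stream) < total_bits_needed:
--         bit_stream += pad_bytes[pad_index % 2]
--         pad_index += 1
--
--     # Split into codewords
--     codewords = [bit_stream[i:i + 8] for i in range(0, len(bit_stream), 8)]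
--     return codewords[:total_data_codewords], version
-- ===== SOURCE B (Python) =====
-- def encode_byte_mode(data: str) -> tuple[list[str], int]:
--     """Return list of 8-bit codewords and selected version for QR code in Byte Mode."""
--     try:
--         data_bytes = data.encode('iso-8859-1', errors='strict')
--     except UnicodeEncodeError:
--         raise ValueError("Data contains characters outside ISO-8859-1.")
--
--     n = len(data_bytes)
--     if n <= 17:
--         version, total_data_codewords = 1, 19
--     elif n <= 32:
--         version, total_data_codewords = 2, 34
--     else:
--         raise ValueError(f"Input too long for Version 2 L (max 32 bytes).")
--
--     # Compute each codeword's byte VALUE directly by nibble pairing: the header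
--     # (4-bit mode + 8-bit count) is 12 bits, so every codeword combines the low
--     # nibble of one unit with the high nibble of the next; no bit stream is built.
--     codeword_values = [0x40 | (n >> 4)]
--     low_nibble = n & 0xF
--     for b in data_bytes:
--         codeword_values.append((low_nibble << 4) | (b >> 4))
--         low_nibble = b & 0xF
--     # last data codeword: pending low nibble + terminator/alignment zeros
--     codeword_values.append(low_nibble << 4)
--     # alternating pad bytes up to capacity
--     for i in range(total_data_codewords - len(codeword_values)):
--         codeword_values.append(0xEC if i % 2 == 0 else 0x11)
--
--     return [format(v, '08b') for v in codeword_values], version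
-- ===== Notes on version B (the rewrite author's own statement) =====
-- stated objective: alternative
-- what changed: B never builds a bit string: it computes each codeword's byte value directly by nibble pairing (mode nibble, count, data bytes offset by 4 bits) plus alternating 0xEC/0x11 pad values, and formats each value as an 8-bit binary string at the end.
import Mathlib
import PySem

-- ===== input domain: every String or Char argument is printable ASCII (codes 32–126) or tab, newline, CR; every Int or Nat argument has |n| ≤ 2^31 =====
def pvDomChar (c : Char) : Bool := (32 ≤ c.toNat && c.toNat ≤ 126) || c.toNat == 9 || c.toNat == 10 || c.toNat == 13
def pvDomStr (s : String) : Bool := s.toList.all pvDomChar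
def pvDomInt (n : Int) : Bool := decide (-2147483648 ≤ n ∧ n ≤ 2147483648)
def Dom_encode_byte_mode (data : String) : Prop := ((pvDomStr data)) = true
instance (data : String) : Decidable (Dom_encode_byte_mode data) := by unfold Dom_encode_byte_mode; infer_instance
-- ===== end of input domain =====

-- B replaces A's bit-string building by direct arithmetic on codeword byte values
-- (nibble pairing); objective: alternative algorithm, same cost.

-- format(v, '08b') for a nonnegative value (all uses are byte values < 256);
-- Python strings are maintained as their character lists (PySem.Chars representation),
-- converted to String only where a Python str value is returned.
def pyFormat08b (v : Nat) : List Char :=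
  let b := PySem.Int.toBinChars (v : Int)
  List.replicate (8 - b.length) '0' ++ b

-- ===== PORT A =====

-- A's 'while len(bit_stream) < total_bits_needed' pad loop
def padA (total_bits : Nat) (pad_index : Nat) (s : List Char) : List Char :=
  if s.length < total_bits then
    -- pad_bytes[pad_index % 2]
    padA total_bits (pad_index + 1)
      (s ++ (if pad_index % 2 == 0 then "11101100".toList else "00010001".toList))
  else s
termination_by total_bits - s.length
decreasing_by
  rcases Nat.mod_two_eq_zero_or_one pad_index with h | h <;> simp [h] <;> omega

def encode_byte_mode (data : String) : List String × Int :=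
  -- data.encode('iso-8859-1'): byte values are the code points (exact on Dom: all chars < 128)
  let data_bytes : List Nat := data.toList.map Char.toNat
  -- version capacity check; len(data_bytes) > 32 raises ValueError (excluded by Pre_)
  let vt : Int × Nat := if data_bytes.length ≤ 17 then (1, 19) else (2, 34)
  let version := vt.1
  let total_data_codewords := vt.2
  let bit_stream := "0100".toList ++ pyFormat08b data_bytes.length
  let bit_stream := data_bytes.foldl (fun s b => s ++ pyFormat08b b) bit_stream
  let total_bits_needed := total_data_codewords * 8
  let remaining_bits : Int := (total_bits_needed : Int) - bit_stream.length
  let terminator_bits : Int := min 4 remaining_bits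
  let bit_stream := bit_stream ++ List.replicate terminator_bits.toNat '0'
  let bit_stream := if bit_stream.length % 8 ≠ 0
    then bit_stream ++ List.replicate (8 - bit_stream.length % 8) '0' else bit_stream
  let bit_stream := padA total_bits_needed 0 bit_stream
  let codewords := (PySem.List.pyRange 0 (bit_stream.length : Int) 8).map
    (fun i => String.ofList (PySem.List.slice bit_stream (some i) (some (i + 8))))
  (PySem.List.slice codewords none (some (total_data_codewords : Int)), version)

-- ===== PORT B =====

def encode_byte_mode_alt (data : String) : List String × Int :=
  let data_bytes : List Nat := data.toList.map Char.toNat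
  let n := data_bytes.length
  -- len > 32 raises ValueError (excluded by Pre_)
  let vt : Int × Nat := if n ≤ 17 then (1, 19) else (2, 34)
  let version := vt.1
  let total_data_codewords := vt.2
  -- nibble pairing: accumulated codeword values plus the pending low nibble
  let st := data_bytes.foldl
    (fun (acc : List Nat × Nat) b => (acc.1 ++ [(acc.2 <<< 4) ||| (b >>> 4)], b &&& 15))
    ([64 ||| (n >>> 4)], n &&& 15)
  let values := st.1 ++ [st.2 <<< 4]
  let values := values ++ (List.range (total_data_codewords - values.length)).map
    (fun i => if i % 2 == 0 then (236 : Nat) else 17)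
  (values.map (fun v => String.ofList (pyFormat08b v)), version)

-- ===== PRECONDITION & SPEC =====
-- Pre_ excludes inputs where A raises ValueError: data longer than 32 characters
-- (characters outside ISO-8859-1 also raise, but all of Dom is ASCII).
def Pre_encode_byte_mode (data : String) : Prop := data.toList.length ≤ 32
instance (data : String) : Decidable (Pre_encode_byte_mode data) := by
  unfold Pre_encode_byte_mode; infer_instance
def pvWitness_encode_byte_mode : String := "HELLO WORLD"

def Spec_encode_byte_mode (data : String) (out : List String × Int) : Prop := out = encode_byte_mode_alt data
instance (data : String) (out : List String × Int) : Decidable (Spec_encode_byte_mode data out) := by unfold Spec_encode_byte_mode; infer_instance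

-- ===== CLAIM (what is proved, stated in full; the proofs are below) =====
def Claim_equal_encode_byte_mode : Prop := ∀ (data : String), Dom_encode_byte_mode data → Pre_encode_byte_mode data → Spec_encode_byte_mode data (encode_byte_mode data)

-- ===== LEMMAS AND PROOFS =====

-- the codeword pipeline of A after the version split (verbatim copy of the port's body)
def A_code (data_bytes : List Nat) (total_data_codewords : Nat) : List String :=
  let bit_stream := "0100".toList ++ pyFormat08b data_bytes.length
  let bit_stream := data_bytes.foldl (fun s b => s ++ pyFormat08b b) bit_stream
  let total_bits_needed := total_data_codewords * 8
  let remaining_bits : Int := (total_bits_needed : Int) - bit_stream.length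
  let terminator_bits : Int := min 4 remaining_bits
  let bit_stream := bit_stream ++ List.replicate terminator_bits.toNat '0'
  let bit_stream := if bit_stream.length % 8 ≠ 0
    then bit_stream ++ List.replicate (8 - bit_stream.length % 8) '0' else bit_stream
  let bit_stream := padA total_bits_needed 0 bit_stream
  let codewords := (PySem.List.pyRange 0 (bit_stream.length : Int) 8).map
    (fun i => String.ofList (PySem.List.slice bit_stream (some i) (some (i + 8))))
  PySem.List.slice codewords none (some (total_data_codewords : Int))

-- the codeword pipeline of B after the version split (verbatim copy of the port's body)
def B_code (data_bytes : List Nat) (total_data_codewords : Nat) : List String :=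
  let n := data_bytes.length
  let st := data_bytes.foldl
    (fun (acc : List Nat × Nat) b => (acc.1 ++ [(acc.2 <<< 4) ||| (b >>> 4)], b &&& 15))
    ([64 ||| (n >>> 4)], n &&& 15)
  let values := st.1 ++ [st.2 <<< 4]
  let values := values ++ (List.range (total_data_codewords - values.length)).map
    (fun i => if i % 2 == 0 then (236 : Nat) else 17)
  values.map (fun v => String.ofList (pyFormat08b v))

lemma portA (data : String) :
    encode_byte_mode data
      = (A_code (data.toList.map Char.toNat)
          (if (data.toList.map Char.toNat).length ≤ 17 then 19 else 34),
         if (data.toList.map Char.toNat).length ≤ 17 then 1 else 2) := by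
  simp only [encode_byte_mode, A_code]
  split_ifs <;> rfl

lemma portB (data : String) :
    encode_byte_mode_alt data
      = (B_code (data.toList.map Char.toNat)
          (if (data.toList.map Char.toNat).length ≤ 17 then 19 else 34),
         if (data.toList.map Char.toNat).length ≤ 17 then 1 else 2) := by
  simp only [encode_byte_mode_alt, B_code]
  split_ifs <;> rfl

-- the low nibble of v
def bin4 (v : Nat) : List Char :=
  let b := PySem.Int.toBinChars (v : Int)
  List.replicate (4 - b.length) '0' ++ b

-- the codeword values B produces for the data part, as a recursion
def vals (lo : Nat) : List Nat → List Nat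
  | [] => [lo <<< 4]
  | b :: bs => ((lo <<< 4) ||| (b >>> 4)) :: vals (b &&& 15) bs

lemma length_vals (lo : Nat) (bs : List Nat) : (vals lo bs).length = bs.length + 1 := by
  induction bs generalizing lo with
  | nil => rfl
  | cons b bs ih => simp [vals, ih]

lemma foldlB (bs : List Nat) : ∀ (pre : List Nat) (lo : Nat),
    ((bs.foldl (fun (acc : List Nat × Nat) b => (acc.1 ++ [(acc.2 <<< 4) ||| (b >>> 4)], b &&& 15))
        (pre, lo)).1
      ++ [(bs.foldl (fun (acc : List Nat × Nat) b => (acc.1 ++ [(acc.2 <<< 4) ||| (b >>> 4)], b &&& 15))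
        (pre, lo)).2 <<< 4])
    = pre ++ vals lo bs := by
  induction bs with
  | nil => intro pre lo; simp [vals]
  | cons b bs ih =>
    intro pre lo
    simp only [List.foldl_cons]
    rw [ih]
    simp [vals]

lemma foldlA (bs : List Nat) : ∀ s : List Char,
    bs.foldl (fun s b => s ++ pyFormat08b b) s = s ++ bs.flatMap pyFormat08b := by
  induction bs with
  | nil => simp
  | cons b bs ih => intro s; simp only [List.foldl_cons, List.flatMap_cons, ih]; simp

set_option maxRecDepth 10000 in
lemma len_bin8 : ∀ v < 256, (pyFormat08b v).length = 8 := by decide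

set_option maxRecDepth 10000 in
lemma bin8_split : ∀ v < 256, pyFormat08b v = bin4 (v >>> 4) ++ bin4 (v &&& 15) := by decide

set_option maxRecDepth 10000 in
lemma bin8_pair : ∀ a < 16, ∀ b < 16, pyFormat08b ((a <<< 4) ||| b) = bin4 a ++ bin4 b := by decide

set_option maxRecDepth 10000 in
lemma bin8_header : ∀ n < 33,
    ('0' :: '1' :: '0' :: '0' :: pyFormat08b n) = pyFormat08b (64 ||| (n >>> 4)) ++ bin4 (n &&& 15) := by
  decide

set_option maxRecDepth 10000 in
lemma bin8_shift : ∀ lo < 16, pyFormat08b (lo <<< 4) = bin4 lo ++ ['0', '0', '0', '0'] := by decide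

set_option maxRecDepth 10000 in
lemma lor_lt : ∀ a < 16, ∀ b < 16, (a <<< 4) ||| b < 256 := by decide

set_option maxRecDepth 10000 in
lemma hdr_lt : ∀ n < 33, 64 ||| (n >>> 4) < 256 := by decide

lemma bin8_pads : pyFormat08b 236 = "11101100".toList ∧ pyFormat08b 17 = "00010001".toList := by
  decide

lemma shiftRight4_lt {b : Nat} (hb : b < 256) : b >>> 4 < 16 := by
  simp [Nat.shiftRight_eq_div_pow]; omega

lemma and15_lt (b : Nat) : b &&& 15 < 16 :=
  Nat.lt_succ_of_le (Nat.and_le_right)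

lemma vals_lt {bs : List Nat} (hb : ∀ b ∈ bs, b < 256) :
    ∀ lo < 16, ∀ v ∈ vals lo bs, v < 256 := by
  induction bs with
  | nil =>
    intro lo hlo v hv
    simp [vals] at hv; subst hv
    have := lor_lt lo hlo 0 (by norm_num); simpa using this
  | cons b bs ih =>
    intro lo hlo v hv
    have hb' : b < 256 := hb b (by simp)
    simp [vals] at hv
    rcases hv with hv | hv
    · subst hv; exact lor_lt lo hlo _ (shiftRight4_lt hb')
    · exact ih (fun x hx => hb x (by simp [hx])) _ (and15_lt b) v hv

lemma stream_eq {bs : List Nat} (hb : ∀ b ∈ bs, b < 256) :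
    ∀ lo < 16, ((vals lo bs).map pyFormat08b).flatten
      = bin4 lo ++ bs.flatMap pyFormat08b ++ ['0', '0', '0', '0'] := by
  induction bs with
  | nil => intro lo hlo; simp [vals, bin8_shift lo hlo]
  | cons b bs ih =>
    intro lo hlo
    have hb' : b < 256 := hb b (by simp)
    simp only [vals, List.map_cons, List.flatten_cons, List.flatMap_cons]
    rw [ih (fun x hx => hb x (by simp [hx])) _ (and15_lt b),
        bin8_pair lo hlo _ (shiftRight4_lt hb'), bin8_split b hb']
    simp

lemma flatMap_len8 {bs : List Nat} (hb : ∀ b ∈ bs, b < 256) :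
    (bs.flatMap pyFormat08b).length = 8 * bs.length := by
  induction bs with
  | nil => simp
  | cons b t ih =>
    simp only [List.flatMap_cons, List.length_append, len_bin8 b (hb b (by simp)),
      ih (fun x hx => hb x (by simp [hx])), List.length_cons]
    ring

-- characterisation of A's pad loop, for a stream exactly 8*k bits short of the target
lemma padA_eq : ∀ (k : Nat) (s : List Char) (i : Nat),
    padA (s.length + 8 * k) i s
      = s ++ ((List.range k).map
          (fun j => if (i + j) % 2 == 0 then "11101100".toList else "00010001".toList)).flatten := by
  intro k
  induction k with
  | zero => intro s i; rw [padA]; simp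
  | succ k ih =>
    intro s i
    rw [padA]
    have hcond : s.length < s.length + 8 * (k + 1) := by omega
    simp only [if_pos hcond]
    have hlen : (s ++ (if i % 2 == 0 then "11101100".toList else "00010001".toList)).length
        = s.length + 8 := by
      rcases Nat.mod_two_eq_zero_or_one i with h | h <;> simp [h]
    have harg : s.length + 8 * (k + 1)
        = (s ++ (if i % 2 == 0 then "11101100".toList else "00010001".toList)).length + 8 * k := by
      rw [hlen]; omega
    rw [harg, ih, List.range_succ_eq_map]
    simp only [List.map_cons, List.map_map, List.flatten_cons, Nat.add_zero, List.append_assoc]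
    congr 2
    apply congrArg List.flatten
    apply List.map_congr_left
    intro j _
    have he : i + (j + 1) = i + 1 + j := by omega
    simp [Function.comp, he]

lemma flatten_length8 {blocks : List (List Char)} (h : ∀ b ∈ blocks, b.length = 8) :
    blocks.flatten.length = 8 * blocks.length := by
  induction blocks with
  | nil => simp
  | cons b bs ih =>
    simp only [List.flatten_cons, List.length_append, h b (by simp),
      ih (fun x hx => h x (by simp [hx])), List.length_cons]
    ring

lemma take8_drop : ∀ (blocks : List (List Char)), (∀ b ∈ blocks, b.length = 8) →
    ∀ k, (hk : k < blocks.length) → (blocks.flatten.drop (8 * k)).take 8 = blocks[k] := by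
  intro blocks
  induction blocks with
  | nil => intro _ k hk; simp at hk
  | cons b bs ih =>
    intro h k hk
    have hb : b.length = 8 := h b (by simp)
    cases k with
    | zero =>
      simp [hb]
    | succ k =>
      have h8 : 8 * (k + 1) = b.length + 8 * k := by omega
      rw [List.flatten_cons, h8, ← List.drop_drop, List.drop_left]
      exact ih (fun x hx => h x (by simp [hx])) k (by simpa using hk)

lemma chunk8 (blocks : List (List Char)) (h : ∀ b ∈ blocks, b.length = 8) :
    (PySem.List.pyRange 0 ((8 * blocks.length : Nat) : Int) 8).map
      (fun i => PySem.List.slice blocks.flatten (some i) (some (i + 8))) = blocks := by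
  rw [PySem.List.pyRange_of_pos _ _ (by norm_num)]
  have hcnt : (if (0 : Int) < ((8 * blocks.length : Nat) : Int)
      then ((((8 * blocks.length : Nat) : Int) - 0 + 8 - 1) / 8).toNat else 0) = blocks.length := by
    split_ifs with hpos
    · have he : (((8 * blocks.length : Nat) : Int) - 0 + 8 - 1) = 7 + (blocks.length : Int) * 8 := by
        push_cast; ring
      rw [he, Int.add_mul_ediv_right 7 (blocks.length : Int) (by norm_num)]
      simp
    · have h0 : blocks.length = 0 := by
        by_contra hne
        exact hpos (by positivity)
      simp [h0]
  rw [hcnt]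
  apply List.ext_getElem (by simp)
  intro k h1 h2
  simp only [List.getElem_map, List.getElem_range]
  have hcast : ((0 : Int) + 8 * ((k : Nat) : Int)) = ((8 * k : Nat) : Int) := by push_cast; ring
  rw [hcast]
  rw [show (((8 * k : Nat) : Int) + 8) = (((8 * k : Nat) : Int) + ((8 : Nat) : Int)) by norm_num]
  rw [PySem.List.slice_natCast_add]
  exact take8_drop blocks h k (by simpa using h2)

lemma chunk8' (blocks : List (List Char)) (h : ∀ b ∈ blocks, b.length = 8) :
    (PySem.List.pyRange 0 ((8 * blocks.length : Nat) : Int) 8).map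
      (fun i => String.ofList (PySem.List.slice blocks.flatten (some i) (some (i + 8))))
      = blocks.map String.ofList := by
  rw [show (fun i => String.ofList (PySem.List.slice blocks.flatten (some i) (some (i + 8))))
      = String.ofList ∘ (fun i => PySem.List.slice blocks.flatten (some i) (some (i + 8))) from rfl,
    ← List.map_map, chunk8 blocks h]

-- B's pad values, mapped through format, give A's pad-byte strings
lemma padB_eq (k : Nat) :
    (((List.range k).map (fun i => if i % 2 == 0 then (236 : Nat) else 17)).map pyFormat08b)
      = (List.range k).map
          (fun j => if (0 + j) % 2 == 0 then "11101100".toList else "00010001".toList) := by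
  rw [List.map_map]
  apply List.map_congr_left
  intro j _
  simp only [Function.comp, Nat.zero_add]
  rcases Nat.mod_two_eq_zero_or_one j with h | h <;>
    simp [h, bin8_pads.1, bin8_pads.2]

-- the central equivalence of the two codeword pipelines
lemma AeqB (bytes : List Nat) (hb : ∀ b ∈ bytes, b < 256) (hn : bytes.length ≤ 32)
    (total : Nat) (h2 : bytes.length + 2 ≤ total) :
    A_code bytes total = B_code bytes total := by
  have hq : "0100".toList = ['0', '1', '0', '0'] := rfl
  have hlo : bytes.length &&& 15 < 16 := and15_lt _
  have hfl : (bytes.flatMap pyFormat08b).length = 8 * bytes.length := flatMap_len8 hb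
  have hhdr : (pyFormat08b bytes.length).length = 8 := len_bin8 _ (by omega)
  simp only [A_code, B_code]
  rw [foldlB bytes [64 ||| (bytes.length >>> 4)] (bytes.length &&& 15), foldlA]
  have h12 : (("0100".toList ++ pyFormat08b bytes.length) ++ bytes.flatMap pyFormat08b).length
      = 12 + 8 * bytes.length := by
    simp [hq, hfl, hhdr]; omega
  have hmin : (min (4 : Int) (((total * 8 : Nat) : Int)
      - ((("0100".toList ++ pyFormat08b bytes.length) ++ bytes.flatMap pyFormat08b).length : Int)))
      = 4 := by
    rw [h12]; push_cast; omega
  rw [hmin]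
  have hrep : List.replicate ((4 : Int).toNat) '0' = ['0', '0', '0', '0'] := rfl
  rw [hrep]
  have hb3 : ((("0100".toList ++ pyFormat08b bytes.length) ++ bytes.flatMap pyFormat08b)
      ++ ['0', '0', '0', '0']).length = 16 + 8 * bytes.length := by
    simp [hq, hfl, hhdr]; omega
  rw [if_neg (by rw [hb3]; omega)]
  rw [show total * 8
      = ((("0100".toList ++ pyFormat08b bytes.length) ++ bytes.flatMap pyFormat08b)
          ++ ['0', '0', '0', '0']).length + 8 * (total - (bytes.length + 2)) from by
    rw [hb3]; omega]
  rw [padA_eq]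
  have hvlen : ([64 ||| (bytes.length >>> 4)] ++ vals (bytes.length &&& 15) bytes).length
      = bytes.length + 2 := by
    simp [length_vals]
  rw [hvlen]
  have hstream : ((("0100".toList ++ pyFormat08b bytes.length) ++ bytes.flatMap pyFormat08b)
        ++ ['0', '0', '0', '0'])
      ++ ((List.range (total - (bytes.length + 2))).map
          (fun j => if (0 + j) % 2 == 0 then "11101100".toList else "00010001".toList)).flatten
      = ((([64 ||| (bytes.length >>> 4)] ++ vals (bytes.length &&& 15) bytes)
          ++ (List.range (total - (bytes.length + 2))).map
              (fun i => if i % 2 == 0 then (236 : Nat) else 17)).map pyFormat08b).flatten := by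
    rw [← padB_eq]
    simp only [List.map_append, List.flatten_append, List.map_cons, List.map_nil,
      List.flatten_cons, List.flatten_nil]
    rw [stream_eq hb _ hlo]
    have hh := bin8_header bytes.length (by omega)
    have hh2 : ∀ X : List Char,
        pyFormat08b (64 ||| (bytes.length >>> 4)) ++ (bin4 (bytes.length &&& 15) ++ X)
          = '0' :: '1' :: '0' :: '0' :: (pyFormat08b bytes.length ++ X) := by
      intro X
      rw [← List.append_assoc, ← hh]
      simp
    simp only [hq, List.append_nil, List.nil_append, List.cons_append, List.append_assoc]
    rw [hh2]
  rw [hstream]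
  have hblocks : ∀ b ∈ (([64 ||| (bytes.length >>> 4)] ++ vals (bytes.length &&& 15) bytes)
      ++ (List.range (total - (bytes.length + 2))).map
          (fun i => if i % 2 == 0 then (236 : Nat) else 17)).map pyFormat08b, b.length = 8 := by
    intro b hbm
    simp only [List.mem_map, List.mem_append, List.mem_cons] at hbm
    obtain ⟨v, hv, rfl⟩ := hbm
    apply len_bin8
    rcases hv with ((rfl | h0) | hv) | hv
    · exact hdr_lt _ (by omega)
    · simp at h0
    · exact vals_lt hb _ hlo v hv
    · obtain ⟨i, _, rfl⟩ := hv
      rcases Nat.mod_two_eq_zero_or_one i with h | h <;> simp [h]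
  rw [flatten_length8 hblocks, chunk8' _ hblocks, PySem.List.slice_to_natCast]
  have hL : (List.map String.ofList ((([64 ||| (bytes.length >>> 4)] ++ vals (bytes.length &&& 15) bytes)
      ++ (List.range (total - (bytes.length + 2))).map
          (fun i => if i % 2 == 0 then (236 : Nat) else 17)).map pyFormat08b)).length = total := by
    simp [length_vals]
    omega
  rw [List.take_of_length_le (le_of_eq hL)]
  simp [List.map_map, Function.comp_def]

-- ===== VERDICT (by name: the statement is the Claim_ definition above) =====
theorem encode_byte_mode_spec : Claim_equal_encode_byte_mode := by
  intro data hdom hpre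
  unfold Spec_encode_byte_mode
  rw [portA, portB]
  have hb : ∀ b ∈ data.toList.map Char.toNat, b < 256 := by
    intro b hbm
    simp only [List.mem_map] at hbm
    obtain ⟨c, hc, rfl⟩ := hbm
    have h1 : pvDomChar c = true := by
      have h0 := hdom
      unfold Dom_encode_byte_mode pvDomStr at h0
      exact List.all_eq_true.mp h0 c hc
    simp [pvDomChar] at h1
    omega
  have hn : (data.toList.map Char.toNat).length ≤ 32 := by
    simpa using hpre
  split_ifs with h17
  · exact congrArg (·, (1 : Int)) (AeqB _ hb hn 19 (by simpa using Nat.add_le_add_right h17 2))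
  · exact congrArg (·, (2 : Int)) (AeqB _ hb hn 34 (by omega))
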